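-- pv_equiv track=rewrite | github.com/fel0ne/studing | PyProjects/lab12/lab12_2.py | check_dialog
-- ===== SOURCE A (Python) =====
-- def check_dialog(message):
--     questions_count = 0
--
--     for sym in message:
--         if sym == 'Q':
--             questions_count += 1
--         elif sym == 'A':
--             questions_count -= 1
--     if questions_count == 0:
--         return('+')
--     else:
--         return('-')
-- ===== SOURCE B (Python) =====
-- def check_dialog(message):
--     # Stack cancellation: a pending Q/A symbol cancels against an opposite
--     # symbol on top of the stack; the dialog is balanced iff nothing remains.
--     pending = []
--     for sym in message:
--         if sym == 'Q' or sym == 'A':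
--             if pending and pending[-1] != sym:
--                 pending.pop()
--             else:
--                 pending.append(sym)
--     return '+' if not pending else '-'
-- ===== Notes on version B (the rewrite author's own statement) =====
-- stated objective: alternative
-- what changed: Replaces the signed counter with a cancellation stack: each Q/A symbol either cancels the opposite symbol on top of the stack or is pushed, and the dialog is balanced iff the stack ends empty.
import Mathlib
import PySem

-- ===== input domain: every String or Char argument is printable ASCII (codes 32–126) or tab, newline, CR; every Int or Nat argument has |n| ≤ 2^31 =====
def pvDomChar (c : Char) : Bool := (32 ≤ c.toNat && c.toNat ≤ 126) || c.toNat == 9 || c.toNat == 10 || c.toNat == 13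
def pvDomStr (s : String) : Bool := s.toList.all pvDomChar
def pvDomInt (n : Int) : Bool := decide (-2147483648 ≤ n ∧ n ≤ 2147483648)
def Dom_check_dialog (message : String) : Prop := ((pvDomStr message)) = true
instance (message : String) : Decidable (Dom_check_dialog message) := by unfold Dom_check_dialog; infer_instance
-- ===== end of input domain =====

-- B replaces A's signed counter with a cancellation stack (push Q/A, cancel the
-- opposite symbol on top); balanced iff the stack ends empty (alternative, same cost).


-- ===== PORT A =====
def check_dialog (message : String) : String :=
  let questions_count : Int :=
    message.toList.foldl
      (fun acc sym =>
        if sym == 'Q' then acc + 1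
        else if sym == 'A' then acc - 1
        else acc) 0
  if questions_count == 0 then "+" else "-"

-- ===== PORT B =====
-- one step of Source B's loop body (pending[-1] = getLast?, pop = dropLast, append = ++ [sym])
def pvStackStep (pending : List Char) (sym : Char) : List Char :=
  if sym == 'Q' || sym == 'A' then
    if !pending.isEmpty && pending.getLast? != some sym then
      pending.dropLast
    else pending ++ [sym]
  else pending

def check_dialog_alt (message : String) : String :=
  let pending : List Char := message.toList.foldl pvStackStep []
  if pending.isEmpty then "+" else "-"

-- ===== PRECONDITION & SPEC =====
def Spec_check_dialog (message : String) (out : String) : Prop := out = check_dialog_alt message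
instance (message : String) (out : String) : Decidable (Spec_check_dialog message out) := by unfold Spec_check_dialog; infer_instance

-- ===== CLAIM (what is proved, stated in full; the proofs are below) =====
def Claim_equal_check_dialog : Prop := ∀ (message : String), Dom_check_dialog message → Spec_check_dialog message (check_dialog message)

-- ===== LEMMAS AND PROOFS =====

-- the stack B maintains as a function of A's counter: d pending questions (d > 0)
-- or -d pending answers (d < 0)
def pvStackOf (d : Int) : List Char :=
  if 0 ≤ d then List.replicate d.toNat 'Q' else List.replicate (-d).toNat 'A'

theorem pvStackOf_nonneg (d : Int) (h : 0 ≤ d) :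
    pvStackOf d = List.replicate d.toNat 'Q' := by
  simp [pvStackOf, h]

theorem pvStackOf_nonpos (d : Int) (h : d ≤ 0) :
    pvStackOf d = List.replicate (-d).toNat 'A' := by
  rcases lt_or_eq_of_le h with h' | h'
  · simp [pvStackOf]; omega
  · subst h'; rfl

theorem pvStackStep_stackOf (d : Int) (sym : Char) :
    pvStackStep (pvStackOf d) sym
      = pvStackOf (if sym == 'Q' then d + 1 else if sym == 'A' then d - 1 else d) := by
  by_cases hq : sym = 'Q'
  · subst hq
    simp only [beq_self_eq_true, if_true]
    by_cases hd : 0 ≤ d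
    · -- no cancellation: push another 'Q'
      rw [pvStackOf_nonneg d hd, pvStackOf_nonneg (d + 1) (by omega)]
      have hsucc : (d + 1).toNat = d.toNat + 1 := by omega
      simp [pvStackStep, hsucc, List.replicate_succ']
      intro h1 h2
      rw [List.getLast?_replicate] at h2
      simp [show d.toNat ≠ 0 by omega] at h2
    · -- cancel one pending 'A'
      rw [pvStackOf_nonpos d (by omega), pvStackOf_nonpos (d + 1) (by omega)]
      obtain ⟨k, hk⟩ : ∃ k, (-d).toNat = k + 1 := ⟨(-d).toNat - 1, by omega⟩
      have hdrop : (-(d + 1)).toNat = k := by omega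
      rw [hk, hdrop]
      simp [pvStackStep, List.getLast?_replicate, List.dropLast_replicate]
  · by_cases ha : sym = 'A'
    · subst ha
      simp only [show ('A' == 'Q') = false from rfl, Bool.false_eq_true, if_false,
        beq_self_eq_true, if_true]
      by_cases hd : d ≤ 0
      · -- no cancellation: push another 'A'
        rw [pvStackOf_nonpos d hd, pvStackOf_nonpos (d - 1) (by omega)]
        have hsucc : (-(d - 1)).toNat = (-d).toNat + 1 := by omega
        rw [hsucc, List.replicate_succ']
        simp [pvStackStep]
        intro h1 h2
        rw [List.getLast?_replicate] at h2
        simp [show (-d).toNat ≠ 0 by omega] at h2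
      · -- cancel one pending 'Q'
        rw [pvStackOf_nonneg d (by omega), pvStackOf_nonneg (d - 1) (by omega)]
        obtain ⟨k, hk⟩ : ∃ k, d.toNat = k + 1 := ⟨d.toNat - 1, by omega⟩
        have hdrop : (d - 1).toNat = k := by omega
        rw [hk, hdrop]
        simp [pvStackStep, List.getLast?_replicate, List.dropLast_replicate]
    · simp [pvStackStep, hq, ha]

theorem pvStackOf_isEmpty (d : Int) : (pvStackOf d).isEmpty = (d == 0) := by
  by_cases h0 : d = 0
  · subst h0; rfl
  · have hne : (d == 0) = false := by simp [h0]
    rw [hne]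
    by_cases h : 0 ≤ d
    · rw [pvStackOf_nonneg d h, List.isEmpty_replicate]
      simp
      omega
    · rw [pvStackOf_nonpos d (by omega), List.isEmpty_replicate]
      simp
      omega

theorem pvFoldl_stack_eq (l : List Char) (d : Int) :
    l.foldl pvStackStep (pvStackOf d)
      = pvStackOf (l.foldl
          (fun acc sym => if sym == 'Q' then acc + 1 else if sym == 'A' then acc - 1 else acc) d) := by
  induction l generalizing d with
  | nil => rfl
  | cons h t ih => simp only [List.foldl_cons, pvStackStep_stackOf, ih]

-- ===== VERDICT (by name: the statement is the Claim_ definition above) =====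
theorem check_dialog_spec : Claim_equal_check_dialog := by
  intro message _
  unfold Spec_check_dialog check_dialog check_dialog_alt
  have key := pvFoldl_stack_eq message.toList 0
  rw [show pvStackOf 0 = [] from rfl] at key
  simp only [key, pvStackOf_isEmpty]
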